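-- pv_equiv track=rewrite | github.com/kuku-forum/Algorithm-study | Samsung_PS/15685_드래곤커브.py | dragon_curve
-- ===== SOURCE A (Python) =====
-- def dragon_curve(idx, gen):
--     # 동 북 서 남
--     ESWN = [(0, 1), (-1, 0), (0, -1), (1, 0)]
--     move_list = [idx]
--     pos = [(0, 0)]
--     pos.append((pos[0][0] + ESWN[idx][0], pos[0][1] + ESWN[idx][1]))
--     # (0, 0) (0, 1) (-1, 1) (-1, 0) [-2, 0] (-2, -1) (-1, -1) (-1, -2) (-2, -2)
--     # 동     북       서      북             서         남          서         북
--
--     for _ in range(gen):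
--         dragon_len = len(pos)
--
--         for i in range(dragon_len - 2, -1, -1):
--             next_step = (move_list[i] + 1)%4
--             move_list.append(next_step)
--             pos.append((pos[-1][0] + ESWN[next_step][0], pos[-1][1] + ESWN[next_step][1]))
--
--     return pos
-- ===== SOURCE B (Python) =====
-- def dragon_curve(idx, gen):
--     # Geometric doubling: instead of growing a direction list, each generation
--     # rotates the existing point list 90 degrees about its endpoint and appends it.
--     ESWN = [(0, 1), (-1, 0), (0, -1), (1, 0)]
--     dx, dy = ESWN[idx]
--     pos = [(0, 0), (dx, dy)]
--     for _ in range(gen):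
--         cx, cy = pos[-1]
--         pos += [(cx - (cy - py), cy + (cx - px)) for px, py in reversed(pos[:-1])]
--     return pos
-- ===== Notes on version B (the rewrite author's own statement) =====
-- stated objective: alternative
-- what changed: B drops the direction/move list entirely: each generation is produced geometrically by rotating the existing point list 90 degrees about its current endpoint (new point = c + R(c - p) for p over the reversed prefix) and appending it, instead of A's interleaved index loop that extends a move list and replays directions.
import Mathlib
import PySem

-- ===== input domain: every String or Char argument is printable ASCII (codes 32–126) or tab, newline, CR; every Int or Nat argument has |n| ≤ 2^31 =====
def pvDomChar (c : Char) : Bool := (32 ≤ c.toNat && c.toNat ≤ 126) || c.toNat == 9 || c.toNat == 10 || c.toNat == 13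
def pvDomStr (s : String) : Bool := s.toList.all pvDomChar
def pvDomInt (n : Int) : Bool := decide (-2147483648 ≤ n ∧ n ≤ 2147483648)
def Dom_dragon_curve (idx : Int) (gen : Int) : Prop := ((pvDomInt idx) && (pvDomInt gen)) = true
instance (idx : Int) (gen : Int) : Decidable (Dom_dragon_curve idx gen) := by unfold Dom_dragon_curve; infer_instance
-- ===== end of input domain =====

-- B replaces A's move-list bookkeeping by a geometric doubling (rotate the point
-- list about its endpoint each generation); equal output, similar cost (objective: alternative).

-- ===== PORT A =====
def dragonESWN : List (Int × Int) := [(0, 1), (-1, 0), (0, -1), (1, 0)]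

-- body of A's inner loop 'for i in range(dragon_len - 2, -1, -1): …'
def dragonInnerStep (st : List Int × List (Int × Int)) (i : Int) :
    List Int × List (Int × Int) :=
  let nextStep := PySem.Int.mod (PySem.List.pyGetD st.1 i 0 + 1) 4
  let last := PySem.List.pyGetD st.2 (-1) ((0 : Int), (0 : Int))
  let e := PySem.List.pyGetD dragonESWN nextStep ((0 : Int), (0 : Int))
  (st.1 ++ [nextStep], st.2 ++ [(last.1 + e.1, last.2 + e.2)])

-- body of A's outer loop 'for _ in range(gen): …'
def dragonOuterStep (st : List Int × List (Int × Int)) (_ : Int) :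
    List Int × List (Int × Int) :=
  let dragonLen : Int := st.2.length
  (PySem.List.pyRange (dragonLen - 2) (-1) (-1)).foldl dragonInnerStep st

def dragon_curve (idx : Int) (gen : Int) : List (Int × Int) :=
  let moveList : List Int := [idx]
  let pos : List (Int × Int) := [((0 : Int), (0 : Int))]
  let p0 := PySem.List.pyGetD pos 0 ((0 : Int), (0 : Int))
  -- ESWN[idx]: in range under Pre_ (A raises IndexError outside it)
  let e := PySem.List.pyGetD dragonESWN idx ((0 : Int), (0 : Int))
  let pos := pos ++ [(p0.1 + e.1, p0.2 + e.2)]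
  ((PySem.List.pyRange 0 gen 1).foldl dragonOuterStep (moveList, pos)).2

-- ===== PORT B =====
-- body of B's loop: rotate the point list 90° about its endpoint c and append it
def dragonAltStep (pos : List (Int × Int)) (_ : Int) : List (Int × Int) :=
  let c := PySem.List.pyGetD pos (-1) ((0 : Int), (0 : Int))
  pos ++ ((PySem.List.slice pos none (some (-1))).reverse.map
    (fun p => (c.1 - (c.2 - p.2), c.2 + (c.1 - p.1))))

def dragon_curve_alt (idx : Int) (gen : Int) : List (Int × Int) :=
  -- ESWN[idx]: in range under Pre_ (B raises IndexError outside it too)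
  let e := PySem.List.pyGetD dragonESWN idx ((0 : Int), (0 : Int))
  let pos : List (Int × Int) := [((0 : Int), (0 : Int)), (e.1, e.2)]
  (PySem.List.pyRange 0 gen 1).foldl dragonAltStep pos

-- ===== PRECONDITION & SPEC =====
-- Pre_ excludes exactly the inputs where the Python A raises IndexError on ESWN[idx]
-- (Python's negative-index wraparound makes -4 ≤ idx < 4 the accepted range).
def Pre_dragon_curve (idx : Int) (gen : Int) : Prop := -4 ≤ idx ∧ idx < 4
instance (idx : Int) (gen : Int) : Decidable (Pre_dragon_curve idx gen) := by
  unfold Pre_dragon_curve; infer_instance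

def pvWitness_dragon_curve : Int × Int := (0, 3)

def Spec_dragon_curve (idx : Int) (gen : Int) (out : List (Int × Int)) : Prop :=
  out = dragon_curve_alt idx gen
instance (idx : Int) (gen : Int) (out : List (Int × Int)) :
    Decidable (Spec_dragon_curve idx gen out) := by unfold Spec_dragon_curve; infer_instance

-- ===== CLAIM (what is proved, stated in full; the proofs are below) =====
def Claim_equal_dragon_curve : Prop := ∀ (idx : Int) (gen : Int),
  Dom_dragon_curve idx gen → Pre_dragon_curve idx gen →
  Spec_dragon_curve idx gen (dragon_curve idx gen)

-- ===== LEMMAS AND PROOFS =====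
-- direction of a move value m (Python's ESWN[m % 4])
def dcDir (m : Int) : Int × Int :=
  if PySem.Int.mod m 4 = 0 then (0, 1)
  else if PySem.Int.mod m 4 = 1 then (-1, 0)
  else if PySem.Int.mod m 4 = 2 then (0, -1)
  else (1, 0)

def dcStepPt (p : Int × Int) (m : Int) : Int × Int := (p.1 + (dcDir m).1, p.2 + (dcDir m).2)

def dcPts (c : Int × Int) : List Int → List (Int × Int)
  | [] => []
  | m :: ms => dcStepPt c m :: dcPts (dcStepPt c m) ms

def dcEnd (c : Int × Int) : List Int → Int × Int
  | [] => c
  | m :: ms => dcEnd (dcStepPt c m) ms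

def dcF (m : Int) : Int := PySem.Int.mod (m + 1) 4
def dcNew (ml : List Int) : List Int := ml ++ ml.reverse.map dcF
def dcPds (ml : List Int) : List (Int × Int) := ((0 : Int), (0 : Int)) :: dcPts (0, 0) ml
def dcRot (c q : Int × Int) : Int × Int := (c.1 - (c.2 - q.2), c.2 + (c.1 - q.1))

theorem dcDir_getD (m : Int) (h1 : -4 ≤ m) (h2 : m < 4) :
    PySem.List.pyGetD dragonESWN m ((0 : Int), (0 : Int)) = dcDir m := by
  interval_cases m <;> decide

theorem dcF_nonneg (m : Int) : 0 ≤ dcF m := PySem.Int.mod_nonneg _ (by norm_num)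
theorem dcF_lt (m : Int) : dcF m < 4 := PySem.Int.mod_lt _ (by norm_num)

theorem dcDir_F (m : Int) : dcDir (dcF m) = (-(dcDir m).2, (dcDir m).1) := by
  have hm : PySem.Int.mod m 4 = m % 4 := PySem.Int.mod_eq_emod_of_pos (by norm_num)
  have hf : PySem.Int.mod (m + 1) 4 = (m + 1) % 4 := PySem.Int.mod_eq_emod_of_pos (by norm_num)
  have h4 : m % 4 = 0 ∨ m % 4 = 1 ∨ m % 4 = 2 ∨ m % 4 = 3 := by omega
  rcases h4 with h | h | h | h <;>
    · have hf1 : (m + 1) % 4 = (m % 4 + 1) % 4 := by omega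
      simp [dcDir, dcF, hf1, h]

theorem dcPts_append (xs ys : List Int) : ∀ c,
    dcPts c (xs ++ ys) = dcPts c xs ++ dcPts (dcEnd c xs) ys := by
  induction xs with
  | nil => simp [dcPts, dcEnd]
  | cons m ms ih => intro c; simp [dcPts, dcEnd, ih]

theorem dcEnd_append (xs ys : List Int) : ∀ c,
    dcEnd c (xs ++ ys) = dcEnd (dcEnd c xs) ys := by
  induction xs with
  | nil => simp [dcEnd]
  | cons m ms ih => intro c; simp [dcEnd, ih]

theorem length_dcPts (ms : List Int) : ∀ c, (dcPts c ms).length = ms.length := by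
  induction ms with
  | nil => simp [dcPts]
  | cons m ms ih => intro c; simp [dcPts, ih]

theorem getLast_cons_dcPts (ms : List Int) : ∀ c,
    (c :: dcPts c ms).getLast (List.cons_ne_nil _ _) = dcEnd c ms := by
  induction ms with
  | nil => intro c; simp [dcPts, dcEnd]
  | cons m ms ih =>
      intro c
      simp only [dcPts, dcEnd]
      rw [List.getLast_cons (List.cons_ne_nil _ _)]
      exact ih (dcStepPt c m)

theorem pyGetD_neg_one_dcPds (ml : List Int) :
    PySem.List.pyGetD (dcPds ml) (-1) ((0 : Int), (0 : Int)) = dcEnd (0, 0) ml := by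
  unfold dcPds
  rw [PySem.List.pyGetD_neg_one _ _ (List.cons_ne_nil _ _)]
  exact getLast_cons_dcPts ml _

theorem dcPds_snoc (xs : List Int) (v : Int) :
    dcPds (xs ++ [v]) = dcPds xs ++
      [((dcEnd (0, 0) xs).1 + (dcDir v).1, (dcEnd (0, 0) xs).2 + (dcDir v).2)] := by
  simp [dcPds, dcPts_append, dcPts, dcStepPt]

-- one inner-loop step of A, in invariant form
theorem innerA_step (ml T : List Int) (j : Nat) (hj : j < ml.length) :
    dragonInnerStep (ml ++ T, dcPds (ml ++ T)) (j : Int)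
      = (ml ++ T ++ [dcF (ml[j])], dcPds (ml ++ T ++ [dcF (ml[j])])) := by
  have hlen : j < (ml ++ T).length := by simp; omega
  have hget : PySem.List.pyGetD (ml ++ T) (j : Int) 0 = ml[j] := by
    rw [PySem.List.pyGetD_natCast, List.getD_eq_getElem _ _ hlen]
    exact List.getElem_append_left hj
  simp only [dragonInnerStep, hget, pyGetD_neg_one_dcPds]
  rw [show PySem.Int.mod ((ml[j]'hj) + 1) 4 = dcF (ml[j]'hj) from rfl]
  rw [dcDir_getD _ (by have := dcF_nonneg (ml[j]'hj); omega) (dcF_lt _)]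
  rw [dcPds_snoc]

theorem innerA (ml : List Int) : ∀ (k : Nat), k ≤ ml.length →
    (PySem.List.pyRange ((k : Int) - 1) (-1) (-1)).foldl dragonInnerStep
      (ml ++ (ml.drop k).reverse.map dcF, dcPds (ml ++ (ml.drop k).reverse.map dcF))
    = (dcNew ml, dcPds (dcNew ml)) := by
  intro k
  induction k with
  | zero =>
      intro _
      rw [PySem.List.pyRange_neg_one_eq_nil (by norm_num)]
      simp [dcNew]
  | succ k ih =>
      intro hk
      have hk' : k < ml.length := by omega
      have hr : PySem.List.pyRange (((k + 1 : Nat) : Int) - 1) (-1) (-1)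
          = (k : Int) :: PySem.List.pyRange ((k : Int) - 1) (-1) (-1) := by
        have : (((k + 1 : Nat) : Int) - 1) = (k : Int) := by push_cast; ring
        rw [this, PySem.List.pyRange_neg_one_cons (by omega)]
      have hdrop : ml.drop k = ml[k] :: ml.drop (k + 1) := by
        exact (List.getElem_cons_drop hk').symm
      have hT : (ml.drop k).reverse.map dcF
          = (ml.drop (k + 1)).reverse.map dcF ++ [dcF ml[k]] := by
        rw [hdrop]
        simp only [List.reverse_cons, List.map_append, List.map_cons, List.map_nil]
      rw [hr, List.foldl_cons, innerA_step ml _ k hk']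
      rw [show ml ++ (ml.drop (k + 1)).reverse.map dcF ++ [dcF ml[k]]
            = ml ++ (ml.drop k).reverse.map dcF by rw [hT, List.append_assoc]]
      exact ih (by omega)

theorem outerA_step (ml : List Int) (t : Int) :
    dragonOuterStep (ml, dcPds ml) t = (dcNew ml, dcPds (dcNew ml)) := by
  have hlen : ((dcPds ml).length : Int) - 2 = ((ml.length : Nat) : Int) - 1 := by
    simp [dcPds, length_dcPts]
    omega
  have h := innerA ml ml.length le_rfl
  simp only [List.drop_length, List.reverse_nil, List.map_nil, List.append_nil] at h
  simpa only [dragonOuterStep, hlen] using h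

theorem foldA (L : List Int) : ∀ (ml : List Int),
    L.foldl dragonOuterStep (ml, dcPds ml)
      = (L.foldl (fun m _ => dcNew m) ml, dcPds (L.foldl (fun m _ => dcNew m) ml)) := by
  induction L with
  | nil => intro ml; rfl
  | cons t L ih => intro ml; simp only [List.foldl_cons, outerA_step]; exact ih (dcNew ml)

theorem step_rot (c p : Int × Int) (m : Int) :
    dcStepPt (dcRot c (dcStepPt p m)) (dcF m) = dcRot c p := by
  simp only [dcStepPt, dcRot, dcDir_F, Prod.mk.injEq]
  constructor <;> ring

theorem end_rot (ms : List Int) : ∀ (p c : Int × Int), dcEnd p ms = c →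
    dcEnd c (ms.reverse.map dcF) = dcRot c p := by
  induction ms with
  | nil => intro p c h; simp [dcEnd] at h; simp [dcEnd, dcRot, h]
  | cons m ms ih =>
      intro p c h
      simp only [dcEnd] at h
      simp only [List.reverse_cons, List.map_append, List.map_cons, List.map_nil,
        dcEnd_append]
      rw [ih (dcStepPt p m) c h]
      simpa [dcEnd] using step_rot c p m

theorem pts_rot (ms : List Int) : ∀ (p c : Int × Int), dcEnd p ms = c →
    ((p :: dcPts p ms).dropLast.reverse).map (dcRot c) = dcPts c (ms.reverse.map dcF) := by
  induction ms with
  | nil => intro p c h; simp [dcPts]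
  | cons m ms ih =>
      intro p c h
      simp only [dcEnd] at h
      simp only [dcPts, List.dropLast_cons₂, List.reverse_cons, List.map_append,
        List.map_cons, List.map_nil]
      rw [ih (dcStepPt p m) c h]
      simp only [dcPts_append]
      congr 1
      rw [end_rot ms (dcStepPt p m) c h]
      simpa [dcPts] using (step_rot c p m).symm

theorem stepB (ml : List Int) (t : Int) :
    dragonAltStep (dcPds ml) t = dcPds (dcNew ml) := by
  simp only [dragonAltStep, pyGetD_neg_one_dcPds, PySem.List.slice_to_neg_one]
  have hrot := pts_rot ml (0, 0) (dcEnd (0, 0) ml) rfl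
  show dcPds ml ++ ((dcPds ml).dropLast.reverse.map (dcRot (dcEnd (0, 0) ml)))
      = dcPds (dcNew ml)
  rw [show (dcPds ml).dropLast = (((0 : Int), (0 : Int)) :: dcPts (0, 0) ml).dropLast from rfl]
  rw [hrot]
  simp [dcPds, dcNew, dcPts_append]

theorem foldB (L : List Int) : ∀ (ml : List Int),
    L.foldl dragonAltStep (dcPds ml) = dcPds (L.foldl (fun m _ => dcNew m) ml) := by
  induction L with
  | nil => intro ml; rfl
  | cons t L ih => intro ml; simp only [List.foldl_cons, stepB]; exact ih (dcNew ml)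

-- ===== VERDICT (by name: the statement is the Claim_ definition above) =====
theorem dragon_curve_spec : Claim_equal_dragon_curve := by
  intro idx gen _ hpre
  obtain ⟨h1, h2⟩ := hpre
  show dragon_curve idx gen = dragon_curve_alt idx gen
  have hpds : ([((0 : Int), (0 : Int))] ++
      [((PySem.List.pyGetD [((0 : Int), (0 : Int))] 0 ((0 : Int), (0 : Int))).1 +
          (PySem.List.pyGetD dragonESWN idx ((0 : Int), (0 : Int))).1,
        (PySem.List.pyGetD [((0 : Int), (0 : Int))] 0 ((0 : Int), (0 : Int))).2 +
          (PySem.List.pyGetD dragonESWN idx ((0 : Int), (0 : Int))).2)])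
      = dcPds [idx] := by
    rw [dcDir_getD idx h1 h2]
    simp [dcPds, dcPts, dcStepPt, PySem.List.pyGetD_zero_cons]
  have hpos0 : [((0 : Int), (0 : Int)),
      ((PySem.List.pyGetD dragonESWN idx ((0 : Int), (0 : Int))).1,
       (PySem.List.pyGetD dragonESWN idx ((0 : Int), (0 : Int))).2)]
      = dcPds [idx] := by
    rw [dcDir_getD idx h1 h2]
    simp [dcPds, dcPts, dcStepPt]
  show ((PySem.List.pyRange 0 gen 1).foldl dragonOuterStep ([idx],
      [((0 : Int), (0 : Int))] ++
      [((PySem.List.pyGetD [((0 : Int), (0 : Int))] 0 ((0 : Int), (0 : Int))).1 +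
          (PySem.List.pyGetD dragonESWN idx ((0 : Int), (0 : Int))).1,
        (PySem.List.pyGetD [((0 : Int), (0 : Int))] 0 ((0 : Int), (0 : Int))).2 +
          (PySem.List.pyGetD dragonESWN idx ((0 : Int), (0 : Int))).2)])).2
    = (PySem.List.pyRange 0 gen 1).foldl dragonAltStep
      [((0 : Int), (0 : Int)),
       ((PySem.List.pyGetD dragonESWN idx ((0 : Int), (0 : Int))).1,
        (PySem.List.pyGetD dragonESWN idx ((0 : Int), (0 : Int))).2)]
  rw [hpds, hpos0, foldA, foldB]
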